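-- pv_equiv track=rewrite | github.com/hwanginbeom/algorithm_study | WeeklyChallenge/WeeklyChallenge04_sejin.py | solution
-- ===== SOURCE A (Python) =====
-- def solution(table, languages, preference):
--     new_table = [list(reversed(i.split(' '))) for i in table]
--
--     check_lst = []
--     for i in new_table:
--         check = 0
--         for x, y in zip(languages, preference):
--             if x in i:
--                 check += (i.index(x)+1) * y
--         check_lst.append(check)
--
--     answer = new_table[check_lst.index(max(check_lst))][-1]
--     return answer
-- ===== SOURCE B (Python) =====
-- def solution(table, languages, preference):
--     # merge duplicate languages: same index contributions add, so weights sum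
--     weight = {}
--     for lang, w in zip(languages, preference):
--         weight[lang] = weight.get(lang, 0) + w
--     best_score = None
--     best_name = None
--     for row in table:
--         tokens = row.split(' ')
--         # token-driven scoring: one reverse scan, each weighted token counts
--         # only at its first reversed position (a seen-set), no list.index calls
--         score = 0
--         seen = set()
--         for k, tok in enumerate(reversed(tokens), 1):
--             if tok in weight and tok not in seen:
--                 score += k * weight[tok]
--                 seen.add(tok)
--         if best_score is None or score > best_score:
--             best_score = score
--             best_name = tokens[0]
--     return best_name
-- ===== Notes on version B (the rewrite author's own statement) =====
-- stated objective: faster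
-- what changed: B scores each row token-by-token in one reverse scan with a first-occurrence seen-set and a merged weight dict (no per-language loop, no list.index scans, no list reversal materialised per lookup), and selects the winner with a running strict-> best tracker instead of building a score list and re-scanning it with index(max()).
import Mathlib
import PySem

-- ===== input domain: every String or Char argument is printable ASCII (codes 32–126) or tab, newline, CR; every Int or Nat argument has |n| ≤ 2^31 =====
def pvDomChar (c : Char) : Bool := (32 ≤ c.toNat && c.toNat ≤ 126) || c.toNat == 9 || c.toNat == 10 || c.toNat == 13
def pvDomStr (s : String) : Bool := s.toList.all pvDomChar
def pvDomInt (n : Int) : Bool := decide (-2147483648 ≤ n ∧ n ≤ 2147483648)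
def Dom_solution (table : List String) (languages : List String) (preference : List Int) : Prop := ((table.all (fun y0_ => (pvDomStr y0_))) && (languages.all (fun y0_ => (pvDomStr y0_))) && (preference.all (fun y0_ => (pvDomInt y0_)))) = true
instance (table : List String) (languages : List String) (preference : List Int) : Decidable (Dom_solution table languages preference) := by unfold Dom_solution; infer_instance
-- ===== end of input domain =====

-- B scores each row by a single token-driven reverse scan with a first-occurrence seen-set and a merged
-- weight dict (no per-language loop, no list.index scans), and picks the winner with a running
-- strict-> best tracker instead of A's score list + index(max) re-scan (objective: faster).

-- shared primitive: Python's row.split(' ') (sep is the non-empty literal ' ', so split? is always `some`)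
def pySplitSpace (s : String) : List String := (PySem.Str.split? s " ").getD []

-- ===== PORT A =====
def solution (table : List String) (languages : List String) (preference : List Int) : String :=
  let newTable := table.map (fun i => (pySplitSpace i).reverse)
  let checkLst := newTable.foldl (fun acc i =>
    acc ++ [(languages.zip preference).foldl
      (fun check p =>
        if p.1 ∈ i then
          check + ((((PySem.List.index? i p.1).getD 0 : Nat) : Int) + 1) * p.2
        else check) 0]) []
  match PySem.List.max? checkLst (fun v => v) with
  | none => ""      -- unreachable under Pre_ (empty table: Python's max([]) raises ValueError)
  | some m =>
    match PySem.List.index? checkLst m with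
    | none => ""
    | some idx =>
      match PySem.List.pyGet? newTable (idx : Int) with
      | none => ""
      | some row =>
        match PySem.List.pyGet? row (-1) with
        | none => ""
        | some ans => ans

-- ===== PORT B =====
def solution_alt (table : List String) (languages : List String) (preference : List Int) : String :=
  let weight := (languages.zip preference).foldl
      (fun d p => d.insert p.1 (d.getD p.1 0 + p.2)) (PySem.Dict.empty : PySem.Dict String Int)
  let res := table.foldl (fun (st : Option Int × String) row =>
      let tokens := pySplitSpace row
      -- for k, tok in enumerate(reversed(tokens), 1): first-occurrence tokens add k * weight[tok]
      let score := ((PySem.List.enumerate tokens.reverse 1).foldl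
          (fun (sc : Int × PySem.Set String) q =>
            if weight.contains q.2 && !(PySem.Set.contains sc.2 q.2) then
              (sc.1 + q.1 * weight.getD q.2 0, PySem.Set.add sc.2 q.2)
            else sc)
          (0, (PySem.Set.empty : PySem.Set String))).1
      match st.1 with
      | none => (some score, (tokens[0]?).getD "")           -- best_name = None initially, rendered "" (only returned off Pre_)
      | some b => if score > b then (some score, (tokens[0]?).getD "") else st)
    ((none : Option Int), "")
  res.2

-- ===== PRECONDITION & SPEC =====
-- Pre_ excludes only the empty table, on which Python A raises ValueError (max of an empty list).
def Pre_solution (table : List String) (languages : List String) (preference : List Int) : Prop :=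
  table ≠ []
instance (table : List String) (languages : List String) (preference : List Int) : Decidable (Pre_solution table languages preference) := by unfold Pre_solution; infer_instance
def pvWitness_solution : List String × List String × List Int :=
  (["python c", "java python"], ["python", "java"], [3, 2])
def Spec_solution (table : List String) (languages : List String) (preference : List Int) (out : String) : Prop := out = solution_alt table languages preference
instance (table : List String) (languages : List String) (preference : List Int) (out : String) : Decidable (Spec_solution table languages preference out) := by unfold Spec_solution; infer_instance

-- ===== CLAIM (what is proved, stated in full; the proofs are below) =====
def Claim_equal_solution : Prop := ∀ (table : List String) (languages : List String) (preference : List Int), Dom_solution table languages preference → Pre_solution table languages preference → Spec_solution table languages preference (solution table languages preference)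

-- ===== LEMMAS AND PROOFS =====

-- proof-only abbreviations for the two per-row scores, the name extractor and the dicts
def revTok (r : String) : List String := (pySplitSpace r).reverse

def sA (languages : List String) (preference : List Int) (r : String) : Int :=
  (languages.zip preference).foldl
    (fun check p =>
      if p.1 ∈ revTok r then
        check + ((((PySem.List.index? (revTok r) p.1).getD 0 : Nat) : Int) + 1) * p.2
      else check) 0

def buildW (languages : List String) (preference : List Int) : PySem.Dict String Int :=
  (languages.zip preference).foldl
    (fun d p => d.insert p.1 (d.getD p.1 0 + p.2)) PySem.Dict.empty

-- B's inner reverse-scan step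
def stepS (w : PySem.Dict String Int) (sc : Int × PySem.Set String) (q : Int × String) : Int × PySem.Set String :=
  if w.contains q.2 && !(PySem.Set.contains sc.2 q.2) then
    (sc.1 + q.1 * w.getD q.2 0, PySem.Set.add sc.2 q.2)
  else sc

def sB (w : PySem.Dict String Int) (r : String) : Int :=
  ((PySem.List.enumerate (pySplitSpace r).reverse 1).foldl (stepS w)
    (0, (PySem.Set.empty : PySem.Set String))).1

def nmF (r : String) : String := ((pySplitSpace r)[0]?).getD ""

def pick {α : Type} (s : α → Int) (p q : α) : α := if s q > s p then q else p

def Acore {α : Type} (s : α → Int) (nm : α → String) (l : List α) (M : Int) : String :=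
  match PySem.List.index? (l.map s) M with
  | some idx =>
    match l[idx]? with
    | some r => nm r
    | none => ""
  | none => ""

-- sum over a nodup list of two functions differing only at one member
theorem sum_map_diff_single {α : Type} [DecidableEq α] (l : List α) (hnd : l.Nodup) (x : α)
    (hx : x ∈ l) (u v : α → Int) (h : ∀ k ∈ l, k ≠ x → u k = v k) :
    (l.map u).sum = (l.map v).sum + (u x - v x) := by
  induction l with
  | nil => cases hx
  | cons a l ih =>
    rcases List.nodup_cons.mp hnd with ⟨ha, hnd'⟩
    rcases List.mem_cons.mp hx with rfl | hxl
    · have htail : (l.map u).sum = (l.map v).sum := by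
        refine congrArg List.sum (List.map_congr_left ?_)
        intro k hk
        exact h k (List.mem_cons_of_mem _ hk) (fun hkx => ha (hkx ▸ hk))
      simp only [List.map_cons, List.sum_cons, htail]
      ring
    · have hax : a ≠ x := fun hh => ha (hh ▸ hxl)
      have hrec := ih hnd' hxl (fun k hk hkx => h k (List.mem_cons_of_mem _ hk) hkx)
      have hua : u a = v a := h a (List.mem_cons_self) hax
      simp only [List.map_cons, List.sum_cons, hrec, hua]
      ring

-- inserting k ↦ old + y adds F k * y to the item-sum
theorem sum_items_insert_add (F : String → Int) (d : PySem.Dict String Int)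
    (hnd : d.keys.Nodup) (x : String) (y : Int) :
    (((d.insert x (d.getD x 0 + y)).items).map (fun p => F p.1 * p.2)).sum
      = ((d.items).map (fun p => F p.1 * p.2)).sum + F x * y := by
  by_cases hc : d.contains x = true
  · have hxk : x ∈ d.keys := (PySem.Dict.contains_iff_mem_keys d x).mp hc
    have hnd' : (d.insert x (d.getD x 0 + y)).keys.Nodup :=
      PySem.Dict.nodup_keys_insert d x _ hnd
    rw [PySem.Dict.items_eq_map_keys (d.insert x (d.getD x 0 + y)) hnd' 0,
        PySem.Dict.items_eq_map_keys d hnd 0,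
        PySem.Dict.keys_insert_of_contains d _ hc]
    rw [List.map_map, List.map_map]
    simp only [Function.comp_def]
    have hdiff := sum_map_diff_single d.keys hnd x hxk
      (fun k => F k * (d.insert x (d.getD x 0 + y)).getD k 0)
      (fun k => F k * d.getD k 0)
      (by
        intro k hk hkx
        simp only [PySem.Dict.getD_insert, if_neg hkx])
    have hgd : (d.insert x (d.getD x 0 + y)).getD x 0 = d.getD x 0 + y := by
      simp
    rw [hdiff]
    beta_reduce
    rw [hgd]
    ring
  · have hc' : d.contains x = false := by
      cases hh : d.contains x with
      | true => exact absurd hh hc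
      | false => rfl
    rw [PySem.Dict.items_insert_of_not_contains d _ hc',
        PySem.Dict.getD_of_not_contains d 0 hc']
    simp only [List.map_append, List.sum_append, List.map_cons, List.map_nil,
      List.sum_cons, List.sum_nil]
    ring

-- grouping: the merged weight dict has the same F-weighted sum as the raw pair list
theorem sum_items_build (F : String → Int) :
    ∀ (ps : List (String × Int)) (d : PySem.Dict String Int), d.keys.Nodup →
    (((ps.foldl (fun d p => d.insert p.1 (d.getD p.1 0 + p.2)) d).items).map (fun p => F p.1 * p.2)).sum
      = ((d.items).map (fun p => F p.1 * p.2)).sum + (ps.map (fun p => F p.1 * p.2)).sum := by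
  intro ps
  induction ps with
  | nil => intro d _; simp
  | cons p ps ih =>
    intro d hnd
    rw [List.foldl_cons, ih _ (PySem.Dict.nodup_keys_insert d p.1 _ hnd),
        sum_items_insert_add F d hnd p.1 p.2]
    simp only [List.map_cons, List.sum_cons]
    ring

theorem nodup_keys_build (languages : List String) (preference : List Int) :
    (buildW languages preference).keys.Nodup := by
  unfold buildW
  exact PySem.Dict.nodup_keys_foldl_insert_key _ _ _ _ PySem.Dict.nodup_keys_empty

-- seen-set membership after add
theorem contains_add_set (s : PySem.Set String) (x y : String) :
    (PySem.Set.add s x).contains y = (s.contains y || y == x) := by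
  unfold PySem.Set.add
  by_cases hyx : y = x
  · subst hyx
    split_ifs with h <;> simp_all
  · split_ifs with h <;> simp_all

-- B's reverse scan, characterised: it adds, per dict entry present in ts and not yet seen,
-- (start + first index in ts) times its weight
theorem inner_scan (w : PySem.Dict String Int) (hnd : w.keys.Nodup) :
    ∀ (ts : List String) (s acc : Int) (seen : PySem.Set String),
    ((PySem.List.enumerate ts s).foldl (stepS w) (acc, seen)).1
      = acc + (w.items.map (fun p =>
          (if ¬ seen.contains p.1 ∧ p.1 ∈ ts then
            s + (((PySem.List.index? ts p.1).getD 0 : Nat) : Int) else 0) * p.2)).sum := by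
  intro ts
  induction ts with
  | nil =>
    intro s acc seen
    simp [PySem.List.enumerate_nil]
  | cons t ts ih =>
    intro s acc seen
    rw [PySem.List.enumerate_cons, List.foldl_cons]
    by_cases hstep : w.contains t = true ∧ seen.contains t = false
    · have hs : stepS w (acc, seen) (s, t)
          = (acc + s * w.getD t 0, PySem.Set.add seen t) := by
        unfold stepS
        simp only
        have hcond : (w.contains t && !(PySem.Set.contains seen t)) = true := by
          simp only [hstep.1, Bool.true_and, Bool.not_eq_true']
          exact hstep.2
        rw [if_pos hcond]
      rw [hs, ih]
      have htk : t ∈ w.keys := (PySem.Dict.contains_iff_mem_keys w t).mp hstep.1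
      rw [PySem.Dict.items_eq_map_keys w hnd 0, List.map_map, List.map_map]
      simp only [Function.comp_def]
      have hdiff := sum_map_diff_single w.keys hnd t htk
        (fun k => (if ¬ seen.contains k ∧ k ∈ t :: ts then
            s + (((PySem.List.index? (t :: ts) k).getD 0 : Nat) : Int) else 0) * w.getD k 0)
        (fun k => (if ¬ (PySem.Set.add seen t).contains k ∧ k ∈ ts then
            (s + 1) + (((PySem.List.index? ts k).getD 0 : Nat) : Int) else 0) * w.getD k 0)
        (by
          intro k hk hkt
          beta_reduce
          have hseen : (PySem.Set.add seen t).contains k = seen.contains k := by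
            rw [contains_add_set]
            simp [hkt]
          have hmem : (k ∈ t :: ts) ↔ k ∈ ts := by
            simp [List.mem_cons, hkt]
          by_cases hsn : seen.contains k = true
          · rw [if_neg (fun hh => hh.1 hsn),
                if_neg (fun hh => hh.1 (by rw [hseen]; exact hsn))]
          · by_cases hm : k ∈ ts
            · rw [if_pos ⟨hsn, hmem.mpr hm⟩,
                  if_pos ⟨by rw [hseen]; exact hsn, hm⟩]
              have hsome : (PySem.List.index? ts k).isSome = true :=
                (PySem.List.index?_isSome_iff _ _).mpr hm
              obtain ⟨j, hj⟩ := Option.isSome_iff_exists.mp hsome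
              rw [PySem.List.index?_cons_of_ne _ (fun hh => hkt hh.symm), hj]
              simp only [Option.map_some, Option.getD_some]
              push_cast
              ring_nf
            · rw [if_neg (fun hh => hm (hmem.mp hh.2)),
                  if_neg (fun hh => hm hh.2)])
      rw [hdiff]
      simp only
      rw [if_pos ⟨by simpa using hstep.2, List.mem_cons_self⟩,
          if_neg (by
            intro hh
            simp at hh)]
      rw [PySem.List.index?_cons_self]
      simp only [Option.getD_some, Nat.cast_zero, add_zero]
      ring
    · have hs : stepS w (acc, seen) (s, t) = (acc, seen) := by
        unfold stepS
        simp only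
        rw [if_neg]
        intro hh
        rcases Bool.and_eq_true .. |>.mp hh with ⟨h1, h2⟩
        apply hstep
        refine ⟨h1, ?_⟩
        simpa [PySem.Set.contains] using h2
      rw [hs, ih]
      refine congrArg (acc + ·) (congrArg List.sum (List.map_congr_left ?_))
      intro p hp
      have hpk : w.contains p.1 = true :=
        (PySem.Dict.contains_iff_mem_keys w p.1).mpr (PySem.Dict.mem_keys_of_mem_items w hp)
      by_cases hpt : p.1 = t
      · have hseenT : seen.contains t = true := by
          by_contra hc
          exact hstep ⟨hpt ▸ hpk, by simpa using hc⟩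
        rw [if_neg (fun hh => hh.1 (by rw [hpt]; exact hseenT)),
            if_neg (fun hh => hh.1 (by rw [hpt]; exact hseenT))]
      · have hmem : (p.1 ∈ t :: ts) ↔ p.1 ∈ ts := by simp [List.mem_cons, hpt]
        by_cases hsn : seen.contains p.1 = true
        · rw [if_neg (fun hh => hh.1 hsn), if_neg (fun hh => hh.1 hsn)]
        · by_cases hm : p.1 ∈ ts
          · rw [if_pos ⟨hsn, hm⟩, if_pos ⟨hsn, hmem.mpr hm⟩]
            have hsome : (PySem.List.index? ts p.1).isSome = true :=
              (PySem.List.index?_isSome_iff _ _).mpr hm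
            obtain ⟨j, hj⟩ := Option.isSome_iff_exists.mp hsome
            rw [PySem.List.index?_cons_of_ne _ (fun hh => hpt hh.symm), hj]
            simp only [Option.map_some, Option.getD_some]
            push_cast
            ring_nf
          · rw [if_neg (fun hh => hm hh.2), if_neg (fun hh => hm (hmem.mp hh.2))]

theorem scores_eq (languages : List String) (preference : List Int) (r : String) :
    sA languages preference r = sB (buildW languages preference) r := by
  have hA : sA languages preference r
      = ((languages.zip preference).map (fun p =>
          (if p.1 ∈ revTok r then ((((PySem.List.index? (revTok r) p.1).getD 0 : Nat) : Int) + 1) else 0) * p.2)).sum := by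
    unfold sA
    rw [PySem.List.foldl_congr_mem' _ _
      (fun (check : Int) (p : String × Int) => check + (if p.1 ∈ revTok r then
        ((((PySem.List.index? (revTok r) p.1).getD 0 : Nat) : Int) + 1) else 0) * p.2) _
      (by
        intro p _ acc
        by_cases h : p.1 ∈ revTok r <;> simp [h])]
    rw [PySem.List.foldl_add _ (fun (p : String × Int) => (if p.1 ∈ revTok r then
      ((((PySem.List.index? (revTok r) p.1).getD 0 : Nat) : Int) + 1) else 0) * p.2) 0]
    simp
  have hB : sB (buildW languages preference) r
      = ((buildW languages preference).items.map (fun p =>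
          (if ¬ (PySem.Set.empty : PySem.Set String).contains p.1 ∧ p.1 ∈ revTok r then
            (1 : Int) + (((PySem.List.index? (revTok r) p.1).getD 0 : Nat) : Int) else 0) * p.2)).sum := by
    unfold sB
    rw [inner_scan _ (nodup_keys_build languages preference) _ 1 0 _]
    rw [zero_add]
    rfl
  have hgroup := sum_items_build (fun k =>
      if k ∈ revTok r then ((((PySem.List.index? (revTok r) k).getD 0 : Nat) : Int) + 1) else 0)
    (languages.zip preference) PySem.Dict.empty PySem.Dict.nodup_keys_empty
  rw [show ((PySem.Dict.empty : PySem.Dict String Int).items) = [] from rfl] at hgroup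
  simp only [List.map_nil, List.sum_nil, zero_add] at hgroup
  rw [hA, hB, ← hgroup]
  unfold buildW
  refine congrArg List.sum (List.map_congr_left ?_)
  intro p _
  beta_reduce
  by_cases hm : p.1 ∈ revTok r
  · rw [if_pos hm, if_pos ⟨by simp [PySem.Set.empty], hm⟩]
    ring
  · rw [if_neg hm, if_neg (fun hh => hm hh.2)]

-- A's index-of-max selection is the strict-> running best
theorem Acore_cons_self {α : Type} (s : α → Int) (nm : α → String) (y : α) (l : List α)
    (M : Int) (hy : s y = M) : Acore s nm (y :: l) M = nm y := by
  unfold Acore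
  rw [List.map_cons, hy, PySem.List.index?_cons_self]
  rfl

theorem Acore_cons_ne {α : Type} (s : α → Int) (nm : α → String) (y : α) (l : List α)
    (M : Int) (hy : s y ≠ M) : Acore s nm (y :: l) M = Acore s nm l M := by
  unfold Acore
  rw [List.map_cons, PySem.List.index?_cons_of_ne _ hy]
  cases hidx : PySem.List.index? (l.map s) M with
  | none => rfl
  | some j => simp

theorem select_eq {α : Type} (s : α → Int) (nm : α → String) :
    ∀ (xs : List α) (x : α),
    Acore s nm (x :: xs) (List.foldl max (s x) (xs.map s)) = nm (xs.foldl (pick s) x) := by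
  intro xs
  induction xs with
  | nil =>
    intro x
    simp only [List.map_nil, List.foldl_nil]
    exact Acore_cons_self s nm x [] (s x) rfl
  | cons q t ih =>
    intro x
    have hmax : s (pick s x q) = max (s x) (s q) := by
      unfold pick
      split_ifs with h
      · exact (max_eq_right h.le).symm
      · exact (max_eq_left (le_of_not_gt h)).symm
    have hM : List.foldl max (s x) ((q :: t).map s) = List.foldl max (s (pick s x q)) (t.map s) := by
      rw [List.map_cons, List.foldl_cons, hmax]
    rw [hM, List.foldl_cons, ← ih (pick s x q)]
    set x' := pick s x q with hx'
    set M := List.foldl max (s x') (t.map s) with hMdef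
    have hx'le : s x' ≤ M := (PySem.List.le_foldl_max (t.map s) (s x')).1
    have hxle : s x ≤ M := le_trans (le_max_left _ _) (hmax ▸ hx'le)
    have hqle : s q ≤ M := le_trans (le_max_right _ _) (hmax ▸ hx'le)
    by_cases hx : s x = M
    · have hq : ¬ (s q > s x) := fun hh => absurd (hx ▸ hh) (not_lt.mpr hqle)
      have hxx : x' = x := by rw [hx']; unfold pick; rw [if_neg hq]
      rw [Acore_cons_self s nm x (q :: t) M hx, hxx, Acore_cons_self s nm x t M hx]
    · by_cases hq : s q > s x
      · have hxx : x' = q := by rw [hx']; unfold pick; rw [if_pos hq]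
        rw [Acore_cons_ne s nm x (q :: t) M hx, hxx]
      · have hxx : x' = x := by rw [hx']; unfold pick; rw [if_neg hq]
        have hsx : s x < M := lt_of_le_of_ne hxle hx
        have hsq : s q ≠ M := ne_of_lt (lt_of_le_of_lt (le_of_not_gt hq) hsx)
        rw [Acore_cons_ne s nm x (q :: t) M hx, Acore_cons_ne s nm q t M hsq, hxx,
            Acore_cons_ne s nm x t M hx]

theorem bfold_aux (w : PySem.Dict String Int) :
    ∀ (xs : List String) (p : String),
    (xs.foldl (fun (st : Option Int × String) row =>
        match st.1 with
        | none => (some (sB w row), nmF row)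
        | some b => if sB w row > b then (some (sB w row), nmF row) else st)
      (some (sB w p), nmF p))
    = (some (sB w (xs.foldl (pick (sB w)) p)), nmF (xs.foldl (pick (sB w)) p)) := by
  intro xs
  induction xs with
  | nil => intro p; rfl
  | cons q t ih =>
    intro p
    rw [List.foldl_cons, List.foldl_cons]
    have hstep : (match (some (sB w p), nmF p).1 with
        | none => (some (sB w q), nmF q)
        | some b => if sB w q > b then (some (sB w q), nmF q) else (some (sB w p), nmF p))
        = ((some (sB w (pick (sB w) p q)), nmF (pick (sB w) p q)) : Option Int × String) := by
      show (if sB w q > sB w p then (some (sB w q), nmF q) else (some (sB w p), nmF p)) = _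
      unfold pick
      split_ifs <;> rfl
    rw [hstep, ih]

theorem bfold_eq (w : PySem.Dict String Int) :
    ∀ (xs : List String) (x : String),
    ((x :: xs).foldl (fun (st : Option Int × String) row =>
        match st.1 with
        | none => (some (sB w row), nmF row)
        | some b => if sB w row > b then (some (sB w row), nmF row) else st)
      ((none : Option Int), ""))
    = (some (sB w (xs.foldl (pick (sB w)) x)), nmF (xs.foldl (pick (sB w)) x)) := by
  intro xs x
  rw [List.foldl_cons]
  exact bfold_aux w xs x

-- ===== VERDICT (by name: the statement is the Claim_ definition above) =====
theorem solution_spec : Claim_equal_solution := by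
  unfold Claim_equal_solution
  intro table languages preference _ hpre
  unfold Spec_solution
  obtain ⟨x, xs, rfl⟩ := List.exists_cons_of_ne_nil hpre
  have hAside : solution (x :: xs) languages preference
      = Acore (sA languages preference) nmF (x :: xs)
          (List.foldl max (sA languages preference x) (xs.map (sA languages preference))) := by
    simp only [solution]
    rw [PySem.List.foldl_append_singleton_eq_map, List.nil_append, List.map_map]
    have hmapeq : ((x :: xs).map ((fun i => (languages.zip preference).foldl
        (fun check p => if p.1 ∈ i then
          check + ((((PySem.List.index? i p.1).getD 0 : Nat) : Int) + 1) * p.2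
        else check) 0) ∘ (fun i => (pySplitSpace i).reverse)))
        = (x :: xs).map (sA languages preference) := rfl
    rw [hmapeq]
    unfold Acore
    have hc1 : (x :: xs).map (sA languages preference)
        = sA languages preference x :: xs.map (sA languages preference) := List.map_cons
    rw [hc1]
    simp only [PySem.List.max?_id_cons]
    set M := List.foldl max (sA languages preference x) (xs.map (sA languages preference)) with hM
    cases hidx : PySem.List.index? (sA languages preference x :: xs.map (sA languages preference)) M with
    | none => rfl
    | some idx =>
      simp only [PySem.List.pyGet?_natCast, List.getElem?_map]
      cases hget : (x :: xs)[idx]? with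
      | none => rfl
      | some r =>
        simp only [Option.map_some]
        rw [PySem.List.pyGet?_neg_one, List.getLast?_reverse, List.head?_eq_getElem?]
        unfold nmF
        cases (pySplitSpace r)[0]? <;> rfl
  rw [hAside]
  have hfun : sA languages preference = sB (buildW languages preference) :=
    funext (scores_eq languages preference)
  rw [hfun, select_eq]
  have hbs : solution_alt (x :: xs) languages preference
      = nmF (xs.foldl (pick (sB (buildW languages preference))) x) := by
    exact congrArg Prod.snd (bfold_eq (buildW languages preference) xs x)
  rw [hbs]
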